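-- pv_equiv track=rewrite | github.com/skyvanguard/CodeForge | utils/gl_utils.py | filter_patch_by_files
-- ===== SOURCE A (Python) =====
-- def filter_patch_by_files(patch_str, target_files):
--     lines = patch_str.splitlines()
--     filtered_lines = []
--     include_block = False
--     for line in lines:
--         if line.startswith("diff --git"):
--             include_block = not any(
--                 f"a/{target}" in line and f"b/{target}" in line
--                 for target in target_files
--             )
--         if include_block:
--             filtered_lines.append(line)
--     return "\n".join(filtered_lines) + "\n"
-- ===== SOURCE B (Python) =====
-- def filter_patch_by_files(patch_str, target_files):
--     def is_header(l):
--         return l.startswith("diff --git")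
--
--     def matches(h):
--         return any(f"a/{t}" in h and f"b/{t}" in h for t in target_files)
--
--     lines = patch_str.splitlines()
--     n = len(lines)
--     kept = []
--     i = 0
--     while i < n and not is_header(lines[i]):  # drop the preamble
--         i += 1
--     while i < n:  # lines[i] is a block header
--         j = i + 1
--         while j < n and not is_header(lines[j]):
--             j += 1
--         if not matches(lines[i]):
--             kept.extend(lines[i:j])
--         i = j
--     return "\n".join(kept) + "\n"
-- ===== Notes on version B (the rewrite author's own statement) =====
-- stated objective: alternative
-- what changed: B scans the patch block-by-block with two index pointers (skip preamble, find each header's block extent, keep or drop the whole block by testing only its header), instead of A's per-line state machine carrying an include_block flag.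
import Mathlib
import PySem

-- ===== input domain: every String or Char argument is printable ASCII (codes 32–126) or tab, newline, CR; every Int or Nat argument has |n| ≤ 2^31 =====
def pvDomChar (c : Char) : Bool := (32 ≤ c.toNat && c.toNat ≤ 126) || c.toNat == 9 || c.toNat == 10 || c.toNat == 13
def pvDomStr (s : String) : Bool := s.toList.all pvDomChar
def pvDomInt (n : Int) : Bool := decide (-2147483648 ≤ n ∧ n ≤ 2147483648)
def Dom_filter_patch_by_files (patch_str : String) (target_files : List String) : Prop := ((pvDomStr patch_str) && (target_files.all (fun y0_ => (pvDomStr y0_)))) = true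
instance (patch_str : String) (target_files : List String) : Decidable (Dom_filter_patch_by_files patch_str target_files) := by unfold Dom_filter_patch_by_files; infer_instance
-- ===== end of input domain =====

-- B replaces A's per-line include_block state machine by a two-pointer block scan
-- (skip preamble, delimit each block at the next header, keep or drop it whole); alternative, same cost.

-- ===== PORT A =====
-- a line "diff --git …"
def pvIsHeaderA (l : String) : Bool := PySem.Str.startswith l "diff --git"

-- any(f"a/{t}" in line and f"b/{t}" in line for t in target_files)
def pvMatchA (target_files : List String) (line : String) : Bool :=
  target_files.any (fun t => PySem.Str.isIn ("a/" ++ t) line && PySem.Str.isIn ("b/" ++ t) line)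

-- one loop iteration of A over state (filtered_lines, include_block)
def pvStepA (target_files : List String) (st : List String × Bool) (line : String) : List String × Bool :=
  let inc := if pvIsHeaderA line then !(pvMatchA target_files line) else st.2
  ((if inc then st.1 ++ [line] else st.1), inc)

def filter_patch_by_files (patch_str : String) (target_files : List String) : String :=
  let lines := PySem.Str.splitlines patch_str
  let st := lines.foldl (pvStepA target_files) ([], false)
  PySem.Str.join "\n" st.1 ++ "\n"

-- ===== PORT B =====
def pvIsHeaderB (l : String) : Bool := PySem.Str.startswith l "diff --git"

def pvMatchB (target_files : List String) (line : String) : Bool :=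
  target_files.any (fun t => PySem.Str.isIn ("a/" ++ t) line && PySem.Str.isIn ("b/" ++ t) line)

-- B's outer while loop: the suffix starting at i (whose head is a header); the inner
-- j-scan is the takeWhile/dropWhile split of the block body at the next header.
def pvGoB (target_files : List String) : List String → List String
  | [] => []
  | l :: ls =>
    (if pvMatchB target_files l then [] else l :: ls.takeWhile (fun x => !pvIsHeaderB x)) ++
      pvGoB target_files (ls.dropWhile (fun x => !pvIsHeaderB x))
termination_by ls => ls.length
decreasing_by
  exact Nat.lt_succ_of_le (List.length_dropWhile_le _ _)

def filter_patch_by_files_alt (patch_str : String) (target_files : List String) : String :=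
  let lines := PySem.Str.splitlines patch_str
  -- first while loop: drop the preamble up to the first header
  let kept := pvGoB target_files (lines.dropWhile (fun x => !pvIsHeaderB x))
  PySem.Str.join "\n" kept ++ "\n"

-- ===== PRECONDITION & SPEC =====
def Spec_filter_patch_by_files (patch_str : String) (target_files : List String) (out : String) : Prop := out = filter_patch_by_files_alt patch_str target_files
instance (patch_str : String) (target_files : List String) (out : String) : Decidable (Spec_filter_patch_by_files patch_str target_files out) := by unfold Spec_filter_patch_by_files; infer_instance

-- ===== CLAIM (what is proved, stated in full; the proofs are below) =====
def Claim_equal_filter_patch_by_files : Prop := ∀ (patch_str : String) (target_files : List String), Dom_filter_patch_by_files patch_str target_files → Spec_filter_patch_by_files patch_str target_files (filter_patch_by_files patch_str target_files)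

-- ===== LEMMAS AND PROOFS =====

-- A's fold only ever appends to the accumulator
theorem pvFoldA_acc (tf : List String) (ls : List String) (acc : List String) (inc : Bool) :
    (ls.foldl (pvStepA tf) (acc, inc)).1 = acc ++ (ls.foldl (pvStepA tf) ([], inc)).1 := by
  induction ls generalizing acc inc with
  | nil => simp
  | cons l ls ih =>
    simp only [List.foldl_cons, pvStepA]
    generalize (if pvIsHeaderA l then !(pvMatchA tf l) else inc) = inc'
    cases inc' with
    | true =>
      simp only [if_true, List.nil_append]
      rw [ih (acc ++ [l]), ih [l], List.append_assoc]
    | false =>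
      simpa using ih acc false

-- what A's loop produces from an arbitrary include_block state
theorem pvFoldA_key (tf : List String) (ls : List String) (inc : Bool) :
    (ls.foldl (pvStepA tf) ([], inc)).1 =
      (if inc then ls.takeWhile (fun x => !pvIsHeaderA x) else []) ++
        pvGoB tf (ls.dropWhile (fun x => !pvIsHeaderA x)) := by
  induction hn : ls.length using Nat.strong_induction_on generalizing ls inc with
  | _ n ih =>
  cases ls with
  | nil => simp [pvGoB]
  | cons l ls =>
    have hlen : ls.length < n := by simp only [List.length_cons] at hn; omega
    have hhh : (fun x => !pvIsHeaderB x) = (fun x => !pvIsHeaderA x) := rfl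
    by_cases h : pvIsHeaderA l
    · have hstep : pvStepA tf ([], inc) l = ((if !pvMatchA tf l then [l] else []), !pvMatchA tf l) := by
        simp [pvStepA, h]
      have hd : (l :: ls).dropWhile (fun x => !pvIsHeaderA x) = l :: ls :=
        List.dropWhile_cons_of_neg (by simp [h])
      have ht : (l :: ls).takeWhile (fun x => !pvIsHeaderA x) = [] :=
        List.takeWhile_cons_of_neg (by simp [h])
      rw [List.foldl_cons, hstep, pvFoldA_acc, ih ls.length hlen ls _ rfl, hd, ht, pvGoB]
      have hm : pvMatchB tf l = pvMatchA tf l := rfl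
      rw [hm, hhh]
      by_cases hma : pvMatchA tf l <;> cases inc <;> simp [hma]
    · have hstep : pvStepA tf ([], inc) l = ((if inc then [l] else []), inc) := by
        simp [pvStepA, h]
      have hd : (l :: ls).dropWhile (fun x => !pvIsHeaderA x) = ls.dropWhile (fun x => !pvIsHeaderA x) :=
        List.dropWhile_cons_of_pos (by simp [h])
      have ht : (l :: ls).takeWhile (fun x => !pvIsHeaderA x) = l :: ls.takeWhile (fun x => !pvIsHeaderA x) :=
        List.takeWhile_cons_of_pos (by simp [h])
      rw [List.foldl_cons, hstep, pvFoldA_acc, ih ls.length hlen ls _ rfl, hd, ht]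
      cases inc <;> simp

-- ===== VERDICT (by name: the statement is the Claim_ definition above) =====
theorem filter_patch_by_files_spec : Claim_equal_filter_patch_by_files := by
  intro patch_str target_files _
  show filter_patch_by_files patch_str target_files = filter_patch_by_files_alt patch_str target_files
  have hA : filter_patch_by_files patch_str target_files =
      PySem.Str.join "\n" ((PySem.Str.splitlines patch_str).foldl (pvStepA target_files) ([], false)).1 ++ "\n" := rfl
  have hB : filter_patch_by_files_alt patch_str target_files =
      PySem.Str.join "\n" (pvGoB target_files ((PySem.Str.splitlines patch_str).dropWhile (fun x => !pvIsHeaderA x))) ++ "\n" := rfl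
  rw [hA, hB, pvFoldA_key]
  simp
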